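-- pv_equiv track=rewrite | github.com/guiribeiro50/programming-portfolio | Universidade Portucalense/Algoritmia e Programação/Project/functions.py | wind_spread
-- ===== SOURCE A (Python) =====
-- def wind_spread(PAM):
--     changed = set()
--     for i in range(len(PAM) - 1):
--         for j in range(len(PAM[i])):
--             if PAM[i][j] == "S" and (i, j) not in changed:
--                 if PAM[i + 1][j] != "S":
--                     PAM[i + 1][j] = "S"
--                     changed.add((i + 1, j))
--     return PAM
-- ===== SOURCE B (Python) =====
-- def wind_spread(PAM):
--     # Two-pass rewrite: freeze the coordinates of the original 'S' cells first,
--     # then write one row below each of them.  Newly written cells are never in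
--     # the frozen list, so no 'changed' bookkeeping set is needed.
--     sources = [(i, j)
--                for i in range(len(PAM) - 1)
--                for j in range(len(PAM[i]))
--                if PAM[i][j] == "S"]
--     for i, j in sources:
--         PAM[i + 1][j] = "S"
--     return PAM
-- ===== Notes on version B (the rewrite author's own statement) =====
-- stated objective: simpler
-- what changed: Instead of interleaving reads and writes under a 'changed' bookkeeping set, B first collects the coordinates of all original 'S' cells in rows 0..n-2 and then, in a second pass, writes 'S' one row below each collected coordinate; freezing the sources makes the guard set and the target!='S' test unnecessary.
import Mathlib
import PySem

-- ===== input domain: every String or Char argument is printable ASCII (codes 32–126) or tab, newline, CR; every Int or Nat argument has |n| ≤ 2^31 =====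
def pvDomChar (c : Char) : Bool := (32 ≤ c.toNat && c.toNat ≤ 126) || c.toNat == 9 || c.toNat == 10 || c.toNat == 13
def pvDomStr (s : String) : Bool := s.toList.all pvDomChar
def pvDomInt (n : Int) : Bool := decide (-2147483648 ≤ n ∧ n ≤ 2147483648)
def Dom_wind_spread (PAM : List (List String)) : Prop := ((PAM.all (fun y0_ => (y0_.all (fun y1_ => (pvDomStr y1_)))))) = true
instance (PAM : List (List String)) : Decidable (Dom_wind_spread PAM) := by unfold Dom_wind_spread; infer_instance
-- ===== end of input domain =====

-- B replaces A's interleaved read/write loop with a guard set by a two-pass scheme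
-- (collect original 'S' coordinates, then write below each); same in-place mutation, simpler.


-- ===== PORT A =====
-- All indices A actually uses are in range inside Pre_ (A raises IndexError on the
-- excluded inputs), so reads are ported via List.getD and writes via List.set.
def wind_spread (PAM : List (List String)) : List (List String) :=
  ((List.range (PAM.length - 1)).foldl (fun st i =>
      (List.range ((st.1.getD i []).length)).foldl (fun st j =>
        if (st.1.getD i []).getD j "" = "S" ∧ (i, j) ∉ st.2 then
          (if (st.1.getD (i + 1) []).getD j "" ≠ "S" then
            (st.1.set (i + 1) ((st.1.getD (i + 1) []).set j "S"),
             PySem.Set.add st.2 (i + 1, j))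
          else st)
        else st) st)
    (PAM, (PySem.Set.ofList [] : PySem.Set (Nat × Nat)))).1

-- ===== PORT B =====
def wind_spread_alt (PAM : List (List String)) : List (List String) :=
  let sources := (List.range (PAM.length - 1)).flatMap (fun i =>
    (List.range ((PAM.getD i []).length)).filterMap (fun j =>
      if (PAM.getD i []).getD j "" = "S" then some (i, j) else none))
  sources.foldl (fun g p => g.set (p.1 + 1) ((g.getD (p.1 + 1) []).set p.2 "S")) PAM

-- ===== PRECONDITION & SPEC =====
-- Pre_ excludes exactly the ragged grids on which Python A raises IndexError:
-- an original 'S' at (i, j) whose row below is shorter than j+1.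
def Pre_wind_spread (PAM : List (List String)) : Prop :=
  ∀ i : Nat, i < PAM.length - 1 → ∀ j : Nat, j < (PAM.getD i []).length →
    (PAM.getD i []).getD j "" = "S" → j < (PAM.getD (i + 1) []).length
instance (PAM : List (List String)) : Decidable (Pre_wind_spread PAM) := by
  unfold Pre_wind_spread; infer_instance
def pvWitness_wind_spread : List (List String) := [["S", "."], [".", "."], ["S", "x"]]
def Spec_wind_spread (PAM : List (List String)) (out : List (List String)) : Prop := out = wind_spread_alt PAM
instance (PAM : List (List String)) (out : List (List String)) : Decidable (Spec_wind_spread PAM out) := by unfold Spec_wind_spread; infer_instance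

-- ===== CLAIM (what is proved, stated in full; the proofs are below) =====
def Claim_equal_wind_spread : Prop := ∀ (PAM : List (List String)), Dom_wind_spread PAM → Pre_wind_spread PAM → Spec_wind_spread PAM (wind_spread PAM)

-- ===== LEMMAS AND PROOFS =====

-- The original row i.
def pvO (PAM : List (List String)) (i : Nat) : List String := PAM.getD i []

-- Columns of original 'S' cells in row i.
def pvJ (PAM : List (List String)) (i : Nat) : List Nat :=
  (List.range (pvO PAM i).length).filter (fun j => (pvO PAM i).getD j "" = "S")

-- The single write "PAM[i+1][j] = 'S'".
def pvW (g : List (List String)) (i j : Nat) : List (List String) :=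
  g.set (i + 1) ((g.getD (i + 1) []).set j "S")

-- Grid after spreading rows 0..i-1 (B's second pass, restricted to the first i source rows).
def pvBpart (PAM : List (List String)) (i : Nat) : List (List String) :=
  (List.range i).foldl (fun g k => (pvJ PAM k).foldl (fun g j => pvW g k j) g) PAM

-- A's 'changed' set after processing rows 0..i-1, as the concrete list it builds.
def pvCH (PAM : List (List String)) (i : Nat) : List (Nat × Nat) :=
  (List.range i).flatMap (fun k =>
    (((pvJ PAM k).filter (fun j => ¬ (pvO PAM (k + 1)).getD j "" = "S")).map (fun j => (k + 1, j))))

-- length of a row is unchanged by a batch of sets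
theorem pvGetDSet {α : Type} (l : List α) (i j : Nat) (a d : α) :
    (l.set i a).getD j d = if i = j ∧ i < l.length then a else l.getD j d := by
  by_cases hij : i = j
  · subst hij
    by_cases hl : i < l.length
    · simp [List.getD_eq_getElem?_getD, hl]
    · rw [List.set_eq_of_length_le (by omega)]
      simp [hl]
  · simp [List.getD_eq_getElem?_getD, hij]

theorem pvGetDOob {α : Type} (l : List α) (j : Nat) (d : α) (h : l.length ≤ j) :
    l.getD j d = d := by
  simp [List.getD_eq_getElem?_getD, List.getElem?_eq_none h]

-- length of a row is unchanged by a batch of sets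
theorem pvLenFoldlSet (js : List Nat) (row : List String) :
    (js.foldl (fun r j => r.set j "S") row).length = row.length := by
  induction js generalizing row with
  | nil => rfl
  | cons a t ih => simp [List.foldl_cons, ih, List.length_set]

-- cell value after a batch of sets
theorem pvGetDFoldlSet (js : List Nat) (row : List String) (j : Nat) :
    (js.foldl (fun r j => r.set j "S") row).getD j "" =
      if j ∈ js ∧ j < row.length then "S" else row.getD j "" := by
  induction js generalizing row with
  | nil => simp
  | cons a t ih =>
      simp only [List.foldl_cons, ih, List.length_set, List.mem_cons]
      by_cases hjt : j ∈ t
      · by_cases hl : j < row.length <;> simp [hjt, hl]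
      · by_cases hja : j = a
        · subst hja
          by_cases hl : j < row.length <;>
            simp [hjt, hl, List.getD_eq_getElem?_getD]
        · simp [hjt, hja, List.getD_eq_getElem?_getD, Ne.symm hja]

-- rows of the grid after one write
theorem pvRowW (g : List (List String)) (i j r : Nat) :
    (pvW g i j).getD r [] =
      if r = i + 1 then (g.getD (i + 1) []).set j "S" else g.getD r [] := by
  rw [pvW, pvGetDSet]
  split_ifs with h1 h2 h2
  · rfl
  · exact absurd h1.1.symm h2
  · subst h2
    have hl : ¬ i + 1 < g.length := fun h => h1 ⟨rfl, h⟩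
    rw [pvGetDOob g (i + 1) [] (by omega)]
    simp
  · rfl

-- a write whose target already reads "S" is the identity
theorem pvWId (g : List (List String)) (i j : Nat)
    (h : (g.getD (i + 1) []).getD j "" = "S") : pvW g i j = g := by
  have hrow : i + 1 < g.length := by
    by_contra hl
    rw [pvGetDOob g (i + 1) [] (by omega)] at h
    rw [pvGetDOob ([] : List String) j "" (by simp)] at h
    exact absurd h (by decide)
  have hj : j < (g.getD (i + 1) []).length := by
    by_contra hl
    rw [pvGetDOob (g.getD (i + 1) []) j "" (by omega)] at h
    exact absurd h (by decide)
  have hval : (g.getD (i + 1) [])[j] = "S" := by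
    rwa [List.getD_eq_getElem?_getD, List.getElem?_eq_getElem hj, Option.getD_some] at h
  have hset : (g.getD (i + 1) []).set j "S" = g.getD (i + 1) [] := by
    conv_lhs => rw [← hval]
    exact List.set_getElem_self hj
  have hgd : g.getD (i + 1) [] = g[i + 1] := by
    simp [List.getD_eq_getElem?_getD, List.getElem?_eq_getElem hrow]
  rw [pvW, hset, hgd]
  exact List.set_getElem_self hrow

theorem pvBpartSucc (PAM : List (List String)) (i : Nat) :
    pvBpart PAM (i + 1) = (pvJ PAM i).foldl (fun g j => pvW g i j) (pvBpart PAM i) := by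
  simp [pvBpart, List.range_succ]

-- rows of a write batch into row i+1
theorem pvRowWBatch (i : Nat) (js : List Nat) (g : List (List String)) (r : Nat) :
    (js.foldl (fun g j => pvW g i j) g).getD r [] =
      if r = i + 1 then js.foldl (fun row j => row.set j "S") (g.getD (i + 1) [])
      else g.getD r [] := by
  induction js generalizing g with
  | nil => by_cases hr : r = i + 1 <;> simp [hr]
  | cons a t iht =>
      simp only [List.foldl_cons, iht, pvRowW]
      by_cases hr : r = i + 1 <;> simp [hr]

-- rows of the partially spread grid
theorem pvRowBpart (PAM : List (List String)) (i r : Nat) :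
    (pvBpart PAM i).getD r [] =
      if r ≤ i ∧ 1 ≤ r then (pvJ PAM (r - 1)).foldl (fun row j => row.set j "S") (pvO PAM r)
      else pvO PAM r := by
  induction i with
  | zero =>
      rw [if_neg (by omega)]
      rfl
  | succ i ih =>
      rw [pvBpartSucc, pvRowWBatch]
      by_cases hr : r = i + 1
      · subst hr
        have hrow : (pvBpart PAM i).getD (i + 1) [] = pvO PAM (i + 1) := by
          rw [ih, if_neg (by omega)]
        rw [if_pos rfl, hrow, if_pos (by omega), (by omega : i + 1 - 1 = i)]
      · rw [if_neg hr, ih]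
        by_cases h1 : r ≤ i ∧ 1 ≤ r
        · rw [if_pos h1, if_pos (by omega)]
        · rw [if_neg h1, if_neg (by omega)]

theorem pvLenRowBpart (PAM : List (List String)) (i r : Nat) :
    ((pvBpart PAM i).getD r []).length = (pvO PAM r).length := by
  rw [pvRowBpart]
  by_cases h : r ≤ i ∧ 1 ≤ r <;> simp [h, pvLenFoldlSet]

-- membership in A's changed set
theorem pvMemCH (PAM : List (List String)) (i : Nat) (a b : Nat) :
    (a, b) ∈ pvCH PAM i ↔ ∃ k, k < i ∧ b ∈ pvJ PAM k ∧ a = k + 1 ∧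
      ¬ (pvO PAM (k + 1)).getD b "" = "S" := by
  simp only [pvCH, List.mem_flatMap, List.mem_map, List.mem_filter, List.mem_range,
    Prod.mk.injEq, decide_not, Bool.not_eq_eq_eq_not, Bool.not_true, decide_eq_false_iff_not]
  constructor
  · rintro ⟨k, hk, j, ⟨hj, hs⟩, ha, hb⟩
    subst ha; subst hb
    exact ⟨k, hk, hj, rfl, hs⟩
  · rintro ⟨k, hk, hj, ha, hs⟩
    subst ha
    exact ⟨k, hk, b, ⟨hj, hs⟩, rfl, rfl⟩

-- the scan condition of A at (i, j) holds exactly on the original 'S' cells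
theorem pvScanCond (PAM : List (List String)) (i j : Nat) (hj : j < (pvO PAM i).length) :
    ((((pvBpart PAM i).getD i []).getD j "" = "S") ∧ (i, j) ∉ pvCH PAM i) ↔
      (pvO PAM i).getD j "" = "S" := by
  have hmem : (i, j) ∈ pvCH PAM i ↔
      (1 ≤ i ∧ j ∈ pvJ PAM (i - 1) ∧ ¬ (pvO PAM i).getD j "" = "S") := by
    rw [pvMemCH]
    constructor
    · rintro ⟨k, hk, hjk, hik, hs⟩
      have hki : k = i - 1 := by omega
      subst hki
      exact ⟨by omega, hjk, by rwa [(by omega : i - 1 + 1 = i)] at hs⟩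
    · rintro ⟨hi, hjk, hs⟩
      exact ⟨i - 1, by omega, hjk, by omega, by rwa [(by omega : i - 1 + 1 = i)]⟩
  by_cases hi : 1 ≤ i
  · have hrow : (pvBpart PAM i).getD i [] =
        (pvJ PAM (i - 1)).foldl (fun row j => row.set j "S") (pvO PAM i) := by
      rw [pvRowBpart]; simp [hi]
    rw [hrow, pvGetDFoldlSet, hmem]
    by_cases hs : (pvO PAM i).getD j "" = "S"
    · constructor
      · intro _; exact hs
      · intro _
        refine ⟨?_, ?_⟩
        · by_cases hm : j ∈ pvJ PAM (i - 1)
          · rw [if_pos ⟨hm, hj⟩]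
          · rw [if_neg (by tauto)]; exact hs
        · rintro ⟨_, _, hns⟩; exact hns hs
    · constructor
      · rintro ⟨hcell, hnm⟩
        by_cases hm : j ∈ pvJ PAM (i - 1)
        · exact absurd ⟨hi, hm, hs⟩ hnm
        · rw [if_neg (by tauto)] at hcell
          exact absurd hcell hs
      · intro h; exact absurd h hs
  · have hi0 : i = 0 := by omega
    subst hi0
    have hb : pvBpart PAM 0 = PAM := rfl
    simp [hb, pvCH, pvO]

-- comprehension with a guard = filter-then-map (no library lemma has this exact form)
theorem pvFilterMapIf {α β : Type} (l : List α) (p : α → Prop) [DecidablePred p] (f : α → β) :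
    l.filterMap (fun x => if p x then some (f x) else none) =
      (l.filter (fun x => decide (p x))).map f := by
  induction l with
  | nil => rfl
  | cons a t ih => by_cases h : p a <;> simp [h, ih]

-- A's inner loop over remaining columns js, from a state reached while scanning row i
theorem pvInner (PAM : List (List String)) (i : Nat) (js : List Nat)
    (g : List (List String)) (ch : PySem.Set (Nat × Nat))
    (hnd : js.Nodup)
    (hrow : g.getD i [] = (pvBpart PAM i).getD i [])
    (hch : ∀ j : Nat, (i, j) ∈ ch ↔ (i, j) ∈ pvCH PAM i)
    (htar : ∀ j ∈ js, (g.getD (i + 1) []).getD j "" = (pvO PAM (i + 1)).getD j "")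
    (hfresh : ∀ j ∈ js, (i + 1, j) ∉ ch) :
    js.foldl (fun st j =>
        if (st.1.getD i []).getD j "" = "S" ∧ (i, j) ∉ st.2 then
          (if (st.1.getD (i + 1) []).getD j "" ≠ "S" then
            (st.1.set (i + 1) ((st.1.getD (i + 1) []).set j "S"),
             PySem.Set.add st.2 (i + 1, j))
          else st)
        else st) (g, ch) =
      (js.foldl (fun g j =>
          if ((pvBpart PAM i).getD i []).getD j "" = "S" ∧ (i, j) ∉ pvCH PAM i then
            pvW g i j else g) g,
       ch ++ (js.filter (fun j =>
          decide (((pvBpart PAM i).getD i []).getD j "" = "S" ∧ (i, j) ∉ pvCH PAM i) &&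
          decide (¬ (pvO PAM (i + 1)).getD j "" = "S"))).map (fun j => (i + 1, j))) := by
  induction js generalizing g ch with
  | nil => simp
  | cons j t ih =>
      have hndt : t.Nodup := hnd.of_cons
      have hjt : j ∉ t := (List.nodup_cons.mp hnd).1
      simp only [List.foldl_cons, List.filter_cons]
      by_cases hc : ((pvBpart PAM i).getD i []).getD j "" = "S" ∧ (i, j) ∉ pvCH PAM i
      · have hc' : ((g.getD i []).getD j "" = "S" ∧ (i, j) ∉ ch) := by
          rw [hrow]; exact ⟨hc.1, fun hm => hc.2 ((hch j).mp hm)⟩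
        by_cases htn : (pvO PAM (i + 1)).getD j "" = "S"
        · -- target already "S": A skips the write, B's write is the identity
          have htg : (g.getD (i + 1) []).getD j "" = "S" := by
            rw [htar j (List.mem_cons_self)]; exact htn
          rw [if_pos hc', if_neg (by simpa using htg), if_pos hc, pvWId g i j htg]
          rw [ih g ch hndt hrow hch (fun j' hj' => htar j' (List.mem_cons_of_mem j hj'))
              (fun j' hj' => hfresh j' (List.mem_cons_of_mem j hj'))]
          have hdrop : (decide (((pvBpart PAM i).getD i []).getD j "" = "S" ∧
              (i, j) ∉ pvCH PAM i) && decide (¬ (pvO PAM (i + 1)).getD j "" = "S")) = false := by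
            simp only [Bool.and_eq_false_iff, decide_eq_false_iff_not]
            exact Or.inr (fun hh => hh htn)
          rw [hdrop, if_neg (by simp)]
        · -- target differs: A writes and records, B writes
          have htg : ¬ (g.getD (i + 1) []).getD j "" = "S" := by
            rw [htar j (List.mem_cons_self)]; exact htn
          rw [if_pos hc', if_pos (by simpa using htg), if_pos hc]
          have hadd : PySem.Set.add ch (i + 1, j) = ch ++ [(i + 1, j)] :=
            PySem.Set.add_of_not_mem (hfresh j (List.mem_cons_self))
          have hW : (g.set (i + 1) ((g.getD (i + 1) []).set j "S"),
              PySem.Set.add ch (i + 1, j)) = (pvW g i j, ch ++ [(i + 1, j)]) := by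
            rw [hadd]; rfl
          rw [hW]
          rw [ih (pvW g i j) (ch ++ [(i + 1, j)]) hndt
              (by rw [pvRowW, if_neg (by omega)]; exact hrow)
              (by
                intro j'
                rw [← hch j']
                simp only [List.mem_append, List.mem_singleton, Prod.mk.injEq]
                constructor
                · rintro (h | ⟨h1, h2⟩)
                  · exact h
                  · omega
                · intro h; exact Or.inl h)
              (by
                intro j' hj'
                rw [pvRowW, if_pos rfl, pvGetDSet,
                  if_neg (fun hh => (by rintro rfl; exact hjt hj' : ¬ j = j') hh.1)]
                exact htar j' (List.mem_cons_of_mem j hj'))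
              (by
                intro j' hj'
                simp only [List.mem_append, List.mem_singleton, Prod.mk.injEq]
                rintro (h | ⟨h1, h2⟩)
                · exact hfresh j' (List.mem_cons_of_mem j hj') h
                · exact hjt (h2 ▸ hj'))]
          have hkeep : (decide (((pvBpart PAM i).getD i []).getD j "" = "S" ∧
              (i, j) ∉ pvCH PAM i) && decide (¬ (pvO PAM (i + 1)).getD j "" = "S")) = true := by
            simp only [Bool.and_eq_true, decide_eq_true_eq]
            exact ⟨hc, htn⟩
          rw [hkeep, if_pos rfl]
          simp
      · have hc' : ¬ ((g.getD i []).getD j "" = "S" ∧ (i, j) ∉ ch) := by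
          rw [hrow]
          intro hh
          exact hc ⟨hh.1, fun hm => hh.2 ((hch j).mpr hm)⟩
        rw [if_neg hc', if_neg hc]
        rw [ih g ch hndt hrow hch (fun j' hj' => htar j' (List.mem_cons_of_mem j hj'))
            (fun j' hj' => hfresh j' (List.mem_cons_of_mem j hj'))]
        have hdrop : (decide (((pvBpart PAM i).getD i []).getD j "" = "S" ∧
            (i, j) ∉ pvCH PAM i) && decide (¬ (pvO PAM (i + 1)).getD j "" = "S")) = false := by
          simp only [Bool.and_eq_false_iff, decide_eq_false_iff_not]
          exact Or.inl hc
        rw [hdrop, if_neg (by simp)]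

-- the outer loop of A computes (pvBpart, pvCH)
theorem pvOuter (PAM : List (List String)) (n : Nat) :
    (List.range n).foldl (fun st i =>
      (List.range ((st.1.getD i []).length)).foldl (fun st j =>
        if (st.1.getD i []).getD j "" = "S" ∧ (i, j) ∉ st.2 then
          (if (st.1.getD (i + 1) []).getD j "" ≠ "S" then
            (st.1.set (i + 1) ((st.1.getD (i + 1) []).set j "S"),
             PySem.Set.add st.2 (i + 1, j))
          else st)
        else st) st)
      (PAM, (PySem.Set.ofList [] : PySem.Set (Nat × Nat))) = (pvBpart PAM n, pvCH PAM n) := by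
  induction n with
  | zero => rfl
  | succ n ih =>
      rw [List.range_succ, List.foldl_append, ih, List.foldl_cons, List.foldl_nil]
      have hlen : ((pvBpart PAM n).getD n []).length = (pvO PAM n).length :=
        pvLenRowBpart PAM n n
      rw [hlen]
      rw [pvInner PAM n (List.range (pvO PAM n).length) (pvBpart PAM n) (pvCH PAM n)
          (List.nodup_range) rfl (fun _ => Iff.rfl)
          (fun j _ => by rw [pvRowBpart, if_neg (by omega)])
          (fun j _ hm => by
            rcases (pvMemCH PAM n (n + 1) j).mp hm with ⟨k, hk, _, hik, _⟩
            omega)]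
      rw [Prod.mk.injEq]
      refine ⟨?_, ?_⟩
      · -- grid component
        have hbody : (fun (g : List (List String)) (j : Nat) =>
            if ((pvBpart PAM n).getD n []).getD j "" = "S" ∧ (n, j) ∉ pvCH PAM n then
              pvW g n j else g) =
            (fun g j => if (fun j : Nat => decide (((pvBpart PAM n).getD n []).getD j "" = "S" ∧
              (n, j) ∉ pvCH PAM n)) j then pvW g n j else g) := by
          funext g j
          by_cases h : ((pvBpart PAM n).getD n []).getD j "" = "S" ∧ (n, j) ∉ pvCH PAM n <;>
            simp [h]
        rw [hbody, ← List.foldl_filter]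
        have hfil : (List.range (pvO PAM n).length).filter
            (fun j : Nat => decide (((pvBpart PAM n).getD n []).getD j "" = "S" ∧
              (n, j) ∉ pvCH PAM n)) = pvJ PAM n := by
          apply List.filter_congr
          intro j hj
          rw [decide_eq_decide]
          exact pvScanCond PAM n j (List.mem_range.mp hj)
        rw [hfil, ← pvBpartSucc]
      · -- changed-set component
        have hsplit : (List.range (pvO PAM n).length).filter (fun j =>
            decide (((pvBpart PAM n).getD n []).getD j "" = "S" ∧ (n, j) ∉ pvCH PAM n) &&
            decide (¬ (pvO PAM (n + 1)).getD j "" = "S")) =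
            (pvJ PAM n).filter (fun j => decide (¬ (pvO PAM (n + 1)).getD j "" = "S")) := by
          have h1 : (List.range (pvO PAM n).length).filter (fun j =>
              decide (((pvBpart PAM n).getD n []).getD j "" = "S" ∧ (n, j) ∉ pvCH PAM n) &&
              decide (¬ (pvO PAM (n + 1)).getD j "" = "S")) =
              ((List.range (pvO PAM n).length).filter (fun j : Nat =>
                decide (((pvBpart PAM n).getD n []).getD j "" = "S" ∧
                  (n, j) ∉ pvCH PAM n))).filter
                (fun j => decide (¬ (pvO PAM (n + 1)).getD j "" = "S")) := by
            rw [List.filter_filter]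
            apply List.filter_congr
            intro j _
            exact Bool.and_comm _ _
          rw [h1]
          congr 1
          apply List.filter_congr
          intro j hj
          rw [decide_eq_decide]
          exact pvScanCond PAM n j (List.mem_range.mp hj)
        rw [hsplit]
        show pvCH PAM n ++ _ = pvCH PAM (n + 1)
        simp [pvCH, List.range_succ]

theorem pvMain (PAM : List (List String)) : wind_spread PAM = wind_spread_alt PAM := by
  rw [wind_spread, wind_spread_alt, pvOuter]
  rw [List.foldl_flatMap]
  show pvBpart PAM (PAM.length - 1) = _
  rw [pvBpart]
  congr 1
  funext g i
  rw [pvFilterMapIf, List.foldl_map]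
  rfl

-- ===== VERDICT (by name: the statement is the Claim_ definition above) =====
theorem wind_spread_spec : Claim_equal_wind_spread := by
  intro PAM _ _
  unfold Spec_wind_spread
  exact pvMain PAM
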